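-- pv_equiv track=rewrite | github.com/peterzeng/lvlms-referential-game | src/evals/red.py | levenshtein_isd
-- ===== SOURCE A (Python) =====
-- def levenshtein_isd(ref: list[str], hyp: list[str]) -> tuple[int, int, int]:
--     """
--     Token-level Levenshtein alignment counts:
--       I = insertions, S = substitutions, D = deletions
--     Unit costs; deterministic tie-break.
--     """
--     n, m = len(ref), len(hyp)
--     dp = [[0] * (m + 1) for _ in range(n + 1)]
--     back = [[None] * (m + 1) for _ in range(n + 1)]  # "M","S","I","D"
--
--     for i in range(1, n + 1):
--         dp[i][0] = i
--         back[i][0] = "D"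
--     for j in range(1, m + 1):
--         dp[0][j] = j
--         back[0][j] = "I"
--
--     for i in range(1, n + 1):
--         for j in range(1, m + 1):
--             cost_sub = 0 if ref[i - 1] == hyp[j - 1] else 1
--
--             del_cost = dp[i - 1][j] + 1
--             ins_cost = dp[i][j - 1] + 1
--             sub_cost = dp[i - 1][j - 1] + cost_sub
--
--             best = min(del_cost, ins_cost, sub_cost)
--             dp[i][j] = best
--
--             # Tie-break: prefer diagonal (match/sub), then insertion, then deletion
--             if sub_cost == best:
--                 back[i][j] = "M" if cost_sub == 0 else "S"
--             elif ins_cost == best: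
--                 back[i][j] = "I"
--             else:
--                 back[i][j] = "D"
--
--     # backtrace
--     i, j = n, m
--     I = S = D = 0
--     while i > 0 or j > 0:
--         op = back[i][j]
--         if op == "I":
--             I += 1
--             j -= 1
--         elif op == "D":
--             D += 1
--             i -= 1
--         elif op == "S":
--             S += 1
--             i -= 1
--             j -= 1
--         else:  # "M"
--             i -= 1
--             j -= 1
--
--     return I, S, D
-- ===== SOURCE B (Python) =====
-- def levenshtein_isd(ref: list[str], hyp: list[str]) -> tuple[int, int, int]:
--     """
--     Single forward DP carrying (cost, I, S, D) per cell, one row at a time: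
--     no back-pointer table and no backtrace loop.  Same unit costs and the
--     same tie-break priority diagonal (match/sub) -> insertion -> deletion.
--     """
--     m = len(hyp)
--     prev = [(j, j, 0, 0) for j in range(m + 1)]
--     for i in range(1, len(ref) + 1):
--         cur = [(i, 0, 0, i)]
--         for j in range(1, m + 1):
--             cost_sub = 0 if ref[i - 1] == hyp[j - 1] else 1
--             dc, dI, dS, dD = prev[j]        # deletion predecessor
--             ic, iI, iS, iD = cur[j - 1]     # insertion predecessor
--             sc, sI, sS, sD = prev[j - 1]    # diagonal predecessor
--             best = min(dc + 1, ic + 1, sc + cost_sub)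
--             if sc + cost_sub == best:
--                 cur.append((best, sI, sS + cost_sub, sD))
--             elif ic + 1 == best:
--                 cur.append((best, iI + 1, iS, iD))
--             else:
--                 cur.append((best, dI, dS, dD + 1))
--         prev = cur
--     _, I, S, D = prev[m]
--     return I, S, D
-- ===== Notes on version B (the rewrite author's own statement) =====
-- stated objective: alternative
-- what changed: B drops A's back-pointer table and backtrace loop entirely: a single forward DP carries the (cost, I, S, D) quadruple per cell, one row at a time (O(m) memory), with the same tie-break priority.
import Mathlib
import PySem

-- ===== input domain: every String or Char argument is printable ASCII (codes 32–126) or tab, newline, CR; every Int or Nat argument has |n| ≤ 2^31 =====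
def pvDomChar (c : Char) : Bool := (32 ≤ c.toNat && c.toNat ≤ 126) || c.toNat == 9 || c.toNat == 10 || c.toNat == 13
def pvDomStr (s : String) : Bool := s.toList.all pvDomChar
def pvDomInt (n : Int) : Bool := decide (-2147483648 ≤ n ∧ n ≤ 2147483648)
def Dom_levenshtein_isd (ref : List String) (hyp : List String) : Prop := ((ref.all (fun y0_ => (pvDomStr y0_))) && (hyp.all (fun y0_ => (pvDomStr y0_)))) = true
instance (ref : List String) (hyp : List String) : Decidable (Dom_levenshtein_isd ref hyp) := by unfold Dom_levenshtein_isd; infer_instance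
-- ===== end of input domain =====

-- B replaces A's back-pointer table and backtrace loop by one forward DP that carries
-- the (cost, I, S, D) quadruple per cell (objective: alternative decomposition).

-- ===== PORT A =====
-- A fills dp and back row by row (row i reads only row i-1 and the prefix of row i);
-- the port builds the two tables in that same row-by-row order.
-- In-range Python indexing ref[i-1] / hyp[j-1] / dp[i][j] is ported with List.getD
-- (exact: all indices the loops use are non-negative and in range).
def pvCellA (ref hyp : List String) (prev dpRow : List Int) (i j : Nat) : Int × Option String :=
  let cost_sub : Int := if ref.getD (i-1) "" = hyp.getD (j-1) "" then 0 else 1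
  let del_cost := prev.getD j 0 + 1
  let ins_cost := dpRow.getD (j-1) 0 + 1
  let sub_cost := prev.getD (j-1) 0 + cost_sub
  let best := min del_cost (min ins_cost sub_cost)
  if sub_cost = best then (best, some (if cost_sub = 0 then "M" else "S"))
  else if ins_cost = best then (best, some "I")
  else (best, some "D")

-- inner loop "for j in range(1, m+1)": state = (dp row of row i so far, back row so far)
def pvInnerA (ref hyp : List String) (prev : List Int) (i : Nat) : Nat → List Int × List (Option String)
  | 0 => ([(i : Int)], [some "D"])
  | j+1 =>
    let st := pvInnerA ref hyp prev i j
    let c := pvCellA ref hyp prev st.1 i (j+1)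
    (st.1 ++ [c.1], st.2 ++ [c.2])

-- outer loop "for i in range(1, n+1)": state = (dp table so far, back table so far);
-- row 0 is what A's border-initialisation phase leaves there.
def pvRowsA (ref hyp : List String) (m : Nat) : Nat → List (List Int) × List (List (Option String))
  | 0 => ([List.map (fun j : Nat => (j : Int)) (List.range (m+1))],
          [none :: List.map (fun _ => some "I") (List.range m)])
  | i+1 =>
    let st := pvRowsA ref hyp m i
    let r := pvInnerA ref hyp (st.1.getD i []) (i+1) m
    (st.1 ++ [r.1], st.2 ++ [r.2])

-- backtrace "while i > 0 or j > 0"; fuel i+j bounds the loop (each step decreases i+j)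
def pvBackA (back : List (List (Option String))) : Nat → Nat → Nat → Int × Int × Int
  | 0, _, _ => (0, 0, 0)
  | fuel+1, i, j =>
    if i = 0 ∧ j = 0 then (0, 0, 0)
    else
      let op := (back.getD i []).getD j none
      if op = some "I" then
        let r := pvBackA back fuel i (j-1); (r.1 + 1, r.2.1, r.2.2)
      else if op = some "D" then
        let r := pvBackA back fuel (i-1) j; (r.1, r.2.1, r.2.2 + 1)
      else if op = some "S" then
        let r := pvBackA back fuel (i-1) (j-1); (r.1, r.2.1 + 1, r.2.2)
      else
        pvBackA back fuel (i-1) (j-1)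

def levenshtein_isd (ref : List String) (hyp : List String) : Int × Int × Int :=
  let n := ref.length
  let m := hyp.length
  let t := pvRowsA ref hyp m n
  pvBackA t.2 (n+m) n m

-- ===== PORT B =====
-- forward DP cell: (cost, I, S, D)
def pvCellB (ref hyp : List String) (prev cur : List (Int × Int × Int × Int)) (i j : Nat) :
    Int × Int × Int × Int :=
  let cost_sub : Int := if ref.getD (i-1) "" = hyp.getD (j-1) "" then 0 else 1
  let d := prev.getD j (0, 0, 0, 0)
  let ic := cur.getD (j-1) (0, 0, 0, 0)
  let s := prev.getD (j-1) (0, 0, 0, 0)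
  let best := min (d.1 + 1) (min (ic.1 + 1) (s.1 + cost_sub))
  if s.1 + cost_sub = best then (best, s.2.1, s.2.2.1 + cost_sub, s.2.2.2)
  else if ic.1 + 1 = best then (best, ic.2.1 + 1, ic.2.2.1, ic.2.2.2)
  else (best, d.2.1, d.2.2.1, d.2.2.2 + 1)

def pvInnerB (ref hyp : List String) (prev : List (Int × Int × Int × Int)) (i : Nat) :
    Nat → List (Int × Int × Int × Int)
  | 0 => [((i : Int), 0, 0, (i : Int))]
  | j+1 =>
    let cur := pvInnerB ref hyp prev i j
    cur ++ [pvCellB ref hyp prev cur i (j+1)]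

def pvRowsB (ref hyp : List String) (m : Nat) : Nat → List (Int × Int × Int × Int)
  | 0 => List.map (fun j : Nat => ((j : Int), (j : Int), 0, 0)) (List.range (m+1))
  | i+1 => pvInnerB ref hyp (pvRowsB ref hyp m i) (i+1) m

def levenshtein_isd_alt (ref : List String) (hyp : List String) : Int × Int × Int :=
  let m := hyp.length
  let c := (pvRowsB ref hyp m ref.length).getD m (0, 0, 0, 0)
  (c.2.1, c.2.2.1, c.2.2.2)

-- ===== PRECONDITION & SPEC =====
def Spec_levenshtein_isd (ref : List String) (hyp : List String) (out : Int × Int × Int) : Prop := out = levenshtein_isd_alt ref hyp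
instance (ref : List String) (hyp : List String) (out : Int × Int × Int) : Decidable (Spec_levenshtein_isd ref hyp out) := by unfold Spec_levenshtein_isd; infer_instance

-- ===== CLAIM (what is proved, stated in full; the proofs are below) =====
def Claim_equal_levenshtein_isd : Prop := ∀ (ref : List String) (hyp : List String), Dom_levenshtein_isd ref hyp → Spec_levenshtein_isd ref hyp (levenshtein_isd ref hyp)

-- ===== LEMMAS AND PROOFS =====

-- pure value of cell (i,j): (cost, I, S, D); proof-only middleman
def pvQ (ref hyp : List String) : Nat → Nat → Int × Int × Int × Int
  | 0, 0 => (0, 0, 0, 0)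
  | i+1, 0 => ((i : Int) + 1, 0, 0, (i : Int) + 1)
  | 0, j+1 => ((j : Int) + 1, (j : Int) + 1, 0, 0)
  | i+1, j+1 =>
    let cost_sub : Int := if ref.getD i "" = hyp.getD j "" then 0 else 1
    let d := pvQ ref hyp i (j+1)
    let ic := pvQ ref hyp (i+1) j
    let s := pvQ ref hyp i j
    let best := min (d.1 + 1) (min (ic.1 + 1) (s.1 + cost_sub))
    if s.1 + cost_sub = best then (best, s.2.1, s.2.2.1 + cost_sub, s.2.2.2)
    else if ic.1 + 1 = best then (best, ic.2.1 + 1, ic.2.2.1, ic.2.2.2)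
    else (best, d.2.1, d.2.2.1, d.2.2.2 + 1)

-- pure back-pointer of cell (i,j)
def pvBp (ref hyp : List String) : Nat → Nat → Option String
  | 0, 0 => none
  | _+1, 0 => some "D"
  | 0, _+1 => some "I"
  | i+1, j+1 =>
    let cost_sub : Int := if ref.getD i "" = hyp.getD j "" then 0 else 1
    let d := pvQ ref hyp i (j+1)
    let ic := pvQ ref hyp (i+1) j
    let s := pvQ ref hyp i j
    let best := min (d.1 + 1) (min (ic.1 + 1) (s.1 + cost_sub))
    if s.1 + cost_sub = best then some (if cost_sub = 0 then "M" else "S")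
    else if ic.1 + 1 = best then some "I"
    else some "D"

theorem getD_map_range {α : Type} (f : Nat → α) (k t : Nat) (d : α) :
    (List.map f (List.range k)).getD t d = if t < k then f t else d := by
  simp [List.getD, List.getElem?_map]
  split_ifs <;> simp_all

theorem pvInnerB_eq (ref hyp : List String) (m i : Nat)
    (prev : List (Int × Int × Int × Int))
    (hprev : prev = List.map (fun t => pvQ ref hyp i t) (List.range (m+1))) :
    ∀ j, j ≤ m →
      pvInnerB ref hyp prev (i+1) j =
        List.map (fun t => pvQ ref hyp (i+1) t) (List.range (j+1)) := by
  intro j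
  induction j with
  | zero =>
    intro _
    simp [pvInnerB, pvQ]
  | succ j ih =>
    intro h
    have hj : j ≤ m := by omega
    rw [pvInnerB, ih hj]
    conv_rhs => rw [List.range_succ]
    rw [List.map_append]
    subst hprev
    congr 1
    unfold pvCellB
    simp only [getD_map_range, List.map_cons, List.map_nil]
    have h1 : j + 1 < m + 1 := by omega
    have h2 : j < m + 1 := by omega
    have h3 : j < j + 1 := by omega
    simp [h1, h2, h3, pvQ]

theorem pvQ_zero (ref hyp : List String) (t : Nat) :
    pvQ ref hyp 0 t = ((t : Int), (t : Int), 0, 0) := by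
  cases t <;> simp [pvQ]

theorem pvRowsB_eq (ref hyp : List String) (m : Nat) :
    ∀ i, pvRowsB ref hyp m i = List.map (fun t => pvQ ref hyp i t) (List.range (m+1)) := by
  intro i
  induction i with
  | zero =>
    rw [pvRowsB]
    exact List.map_congr_left (fun t _ => (pvQ_zero ref hyp t).symm)
  | succ i ih =>
    rw [pvRowsB]
    exact pvInnerB_eq ref hyp m i _ ih m le_rfl

theorem pvInnerA_eq (ref hyp : List String) (m i : Nat)
    (prev : List Int)
    (hprev : prev = List.map (fun t => (pvQ ref hyp i t).1) (List.range (m+1))) :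
    ∀ j, j ≤ m →
      pvInnerA ref hyp prev (i+1) j =
        (List.map (fun t => (pvQ ref hyp (i+1) t).1) (List.range (j+1)),
         List.map (fun t => pvBp ref hyp (i+1) t) (List.range (j+1))) := by
  intro j
  induction j with
  | zero =>
    intro _
    simp [pvInnerA, pvQ, pvBp]
  | succ j ih =>
    intro h
    have hj : j ≤ m := by omega
    rw [pvInnerA, ih hj]
    subst hprev
    have hc : pvCellA ref hyp (List.map (fun t => (pvQ ref hyp i t).1) (List.range (m+1)))
        (List.map (fun t => (pvQ ref hyp (i+1) t).1) (List.range (j+1))) (i+1) (j+1)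
        = ((pvQ ref hyp (i+1) (j+1)).1, pvBp ref hyp (i+1) (j+1)) := by
      unfold pvCellA
      have h1 : j + 1 < m + 1 := by omega
      have h2 : j < m + 1 := by omega
      have h3 : j < j + 1 := by omega
      simp only [getD_map_range, Nat.add_sub_cancel, h1, h2, h3, if_true]
      simp only [pvQ, pvBp]
      split_ifs <;> rfl
    rw [hc]
    conv_rhs => rw [List.range_succ]
    simp

theorem pvRowsA_eq (ref hyp : List String) (m : Nat) :
    ∀ i, pvRowsA ref hyp m i =
      (List.map (fun r => List.map (fun t => (pvQ ref hyp r t).1) (List.range (m+1))) (List.range (i+1)),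
       List.map (fun r => List.map (fun t => pvBp ref hyp r t) (List.range (m+1))) (List.range (i+1))) := by
  intro i
  induction i with
  | zero =>
    rw [pvRowsA]
    rw [show List.range (0+1) = [0] from List.range_one]
    simp only [List.map_cons, List.map_nil, Prod.mk.injEq, List.cons.injEq, and_true]
    constructor
    · exact List.map_congr_left (fun t _ => by rw [pvQ_zero])
    · rw [List.range_succ_eq_map, List.map_cons, List.map_map]
      exact List.cons_eq_cons.mpr ⟨rfl, List.map_congr_left (fun t _ => by simp [pvBp])⟩
  | succ i ih =>
    rw [pvRowsA, ih]
    have hget : ((List.map (fun r => List.map (fun t => (pvQ ref hyp r t).1) (List.range (m+1))) (List.range (i+1))).getD i [])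
        = List.map (fun t => (pvQ ref hyp i t).1) (List.range (m+1)) := by
      rw [getD_map_range]
      simp
    dsimp only
    rw [hget, pvInnerA_eq ref hyp m i _ rfl m le_rfl]
    rw [show List.range (i+1+1) = List.range (i+1) ++ [i+1] from List.range_succ]
    simp only [List.map_append, List.map_cons, List.map_nil]

set_option maxRecDepth 8000 in
theorem pvBackA_eq (ref hyp : List String) (n m : Nat) :
    ∀ fuel i j, i + j ≤ fuel → i ≤ n → j ≤ m →
      pvBackA (List.map (fun r => List.map (fun t => pvBp ref hyp r t) (List.range (m+1))) (List.range (n+1))) fuel i j =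
        ((pvQ ref hyp i j).2.1, (pvQ ref hyp i j).2.2.1, (pvQ ref hyp i j).2.2.2) := by
  intro fuel
  induction fuel with
  | zero =>
    intro i j h hi hj
    obtain ⟨rfl, rfl⟩ : i = 0 ∧ j = 0 := by omega
    simp [pvBackA, pvQ]
  | succ f ih =>
    intro i j h hi hj
    match i, j with
    | 0, 0 => simp [pvBackA, pvQ]
    | 0, j+1 =>
      rw [pvBackA, if_neg (by simp)]
      have hop : ((List.map (fun r => List.map (fun t => pvBp ref hyp r t) (List.range (m+1))) (List.range (n+1))).getD 0 []).getD (j+1) none = pvBp ref hyp 0 (j+1) := by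
        rw [getD_map_range, if_pos (by omega), getD_map_range, if_pos (by omega)]
      simp only [hop, show pvBp ref hyp 0 (j+1) = some "I" from rfl]
      have IH := ih 0 j (by omega) (by omega) (by omega)
      simp [IH, pvQ_zero]
    | i+1, 0 =>
      rw [pvBackA, if_neg (by simp)]
      have hop : ((List.map (fun r => List.map (fun t => pvBp ref hyp r t) (List.range (m+1))) (List.range (n+1))).getD (i+1) []).getD 0 none = pvBp ref hyp (i+1) 0 := by
        rw [getD_map_range, if_pos (by omega), getD_map_range, if_pos (by omega)]
      simp only [hop, show pvBp ref hyp (i+1) 0 = some "D" from rfl]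
      have IH := ih i 0 (by omega) (by omega) (by omega)
      have hq : ∀ k : Nat, pvQ ref hyp k 0 = ((k : Int), 0, 0, (k : Int)) := by
        intro k; cases k <;> simp [pvQ]
      simp [IH, hq]
    | i+1, j+1 =>
      rw [pvBackA, if_neg (by simp)]
      have hop : ((List.map (fun r => List.map (fun t => pvBp ref hyp r t) (List.range (m+1))) (List.range (n+1))).getD (i+1) []).getD (j+1) none = pvBp ref hyp (i+1) (j+1) := by
        rw [getD_map_range, if_pos (by omega), getD_map_range, if_pos (by omega)]
      simp only [hop]
      have IH1 := ih i (j+1) (by omega) (by omega) hj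
      have IH2 := ih (i+1) j (by omega) hi (by omega)
      have IH3 := ih i j (by omega) (by omega) (by omega)
      have hb : pvBp ref hyp (i+1) (j+1) =
          (if (pvQ ref hyp i j).1 + (if ref.getD i "" = hyp.getD j "" then (0:Int) else 1) =
              min ((pvQ ref hyp i (j+1)).1 + 1) (min ((pvQ ref hyp (i+1) j).1 + 1)
                ((pvQ ref hyp i j).1 + (if ref.getD i "" = hyp.getD j "" then (0:Int) else 1)))
           then some (if (if ref.getD i "" = hyp.getD j "" then (0:Int) else 1) = 0 then "M" else "S")
           else if (pvQ ref hyp (i+1) j).1 + 1 =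
              min ((pvQ ref hyp i (j+1)).1 + 1) (min ((pvQ ref hyp (i+1) j).1 + 1)
                ((pvQ ref hyp i j).1 + (if ref.getD i "" = hyp.getD j "" then (0:Int) else 1)))
           then some "I" else some "D") := by
        conv_lhs => rw [pvBp]
      have hq : pvQ ref hyp (i+1) (j+1) =
          (if (pvQ ref hyp i j).1 + (if ref.getD i "" = hyp.getD j "" then (0:Int) else 1) =
              min ((pvQ ref hyp i (j+1)).1 + 1) (min ((pvQ ref hyp (i+1) j).1 + 1)
                ((pvQ ref hyp i j).1 + (if ref.getD i "" = hyp.getD j "" then (0:Int) else 1)))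
           then (min ((pvQ ref hyp i (j+1)).1 + 1) (min ((pvQ ref hyp (i+1) j).1 + 1)
                  ((pvQ ref hyp i j).1 + (if ref.getD i "" = hyp.getD j "" then (0:Int) else 1))),
                 (pvQ ref hyp i j).2.1,
                 (pvQ ref hyp i j).2.2.1 + (if ref.getD i "" = hyp.getD j "" then (0:Int) else 1),
                 (pvQ ref hyp i j).2.2.2)
           else if (pvQ ref hyp (i+1) j).1 + 1 =
              min ((pvQ ref hyp i (j+1)).1 + 1) (min ((pvQ ref hyp (i+1) j).1 + 1)
                ((pvQ ref hyp i j).1 + (if ref.getD i "" = hyp.getD j "" then (0:Int) else 1)))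
           then (min ((pvQ ref hyp i (j+1)).1 + 1) (min ((pvQ ref hyp (i+1) j).1 + 1)
                  ((pvQ ref hyp i j).1 + (if ref.getD i "" = hyp.getD j "" then (0:Int) else 1))),
                 (pvQ ref hyp (i+1) j).2.1 + 1, (pvQ ref hyp (i+1) j).2.2.1, (pvQ ref hyp (i+1) j).2.2.2)
           else (min ((pvQ ref hyp i (j+1)).1 + 1) (min ((pvQ ref hyp (i+1) j).1 + 1)
                  ((pvQ ref hyp i j).1 + (if ref.getD i "" = hyp.getD j "" then (0:Int) else 1))),
                 (pvQ ref hyp i (j+1)).2.1, (pvQ ref hyp i (j+1)).2.2.1, (pvQ ref hyp i (j+1)).2.2.2 + 1)) := by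
        conv_lhs => rw [pvQ]
      rw [hb, hq]
      simp only [Nat.add_sub_cancel]
      rw [IH1, IH2, IH3]
      clear hb hq hop ih h hi hj IH1 IH2 IH3
      by_cases hstr : ref.getD i "" = hyp.getD j ""
      · simp only [if_pos hstr]
        generalize pvQ ref hyp i j = sq
        generalize pvQ ref hyp (i+1) j = iq
        generalize pvQ ref hyp i (j+1) = dq
        generalize min (dq.1 + 1) (min (iq.1 + 1) (sq.1 + 0)) = best
        split_ifs <;> simp_all
      · simp only [if_neg hstr]
        generalize pvQ ref hyp i j = sq
        generalize pvQ ref hyp (i+1) j = iq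
        generalize pvQ ref hyp i (j+1) = dq
        generalize min (dq.1 + 1) (min (iq.1 + 1) (sq.1 + 1)) = best
        split_ifs <;> simp_all

-- ===== VERDICT (by name: the statement is the Claim_ definition above) =====
theorem levenshtein_isd_spec : Claim_equal_levenshtein_isd := by
  intro ref hyp _
  unfold Spec_levenshtein_isd levenshtein_isd levenshtein_isd_alt
  show pvBackA (pvRowsA ref hyp hyp.length ref.length).2 (ref.length + hyp.length) ref.length hyp.length =
    (((pvRowsB ref hyp hyp.length ref.length).getD hyp.length (0,0,0,0)).2.1,
     ((pvRowsB ref hyp hyp.length ref.length).getD hyp.length (0,0,0,0)).2.2.1,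
     ((pvRowsB ref hyp hyp.length ref.length).getD hyp.length (0,0,0,0)).2.2.2)
  rw [(pvRowsA_eq ref hyp hyp.length ref.length)]
  rw [pvBackA_eq ref hyp ref.length hyp.length (ref.length + hyp.length) ref.length hyp.length le_rfl le_rfl le_rfl]
  rw [pvRowsB_eq ref hyp hyp.length ref.length]
  rw [getD_map_range]
  simp
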